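-- pv_equiv track=rewrite | github.com/zishengz/criticAnalyzer | cps_printer.py | get_cp_flags
-- ===== SOURCE A (Python) =====
-- def get_cp_flags(out_raw):
--     '''Get the line # flag for key printout blocks'''
--     flag_cp_list_unique = None
--     flag_bond_list_unique = None
--     flag_cp_groups = None
--     flag_cp_list_all = None
--     flag_connect = None
--     for i in range(len(out_raw)):
--         if flag_cp_list_unique is None:
--             if "* Critical point list, final report (non-equivalent cps)" in out_raw[i]:
--                 flag_cp_list_unique = i
--         if flag_bond_list_unique is None:
--             if "* Analysis of system bonds" in out_raw[i]:
--                 flag_bond_list_unique = i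
--         if flag_cp_groups is None:
--             if "# (x symbols are the non-equivalent representative atoms)" in out_raw[i]:
--                 flag_cp_groups = i
--         if flag_cp_list_all is None:
--             if "* Complete CP list, bcp and rcp connectivity table" in out_raw[i]:
--                 flag_cp_list_all = i
--         if flag_connect is None:
--             if "* Attractor connectivity matrix" in out_raw[i]:
--                 flag_connect = i
--     return flag_cp_list_unique, flag_bond_list_unique, flag_cp_groups, flag_cp_list_all, flag_connect
-- ===== SOURCE B (Python) =====
-- def get_cp_flags(out_raw):
--     '''Get the line # flag for key printout blocks'''
--     def first_line_with(sub):
--         for i, line in enumerate(out_raw):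
--             if sub in line:
--                 return i
--         return None
--     return (first_line_with("* Critical point list, final report (non-equivalent cps)"),
--             first_line_with("* Analysis of system bonds"),
--             first_line_with("# (x symbols are the non-equivalent representative atoms)"),
--             first_line_with("* Complete CP list, bcp and rcp connectivity table"),
--             first_line_with("* Attractor connectivity matrix"))
-- ===== Notes on version B (the rewrite author's own statement) =====
-- stated objective: simpler
-- what changed: A makes one combined pass testing all five substrings per line with five pieces of loop state; B defines a single first-match helper and runs five independent early-exit scans, one per header string.
import Mathlib
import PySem

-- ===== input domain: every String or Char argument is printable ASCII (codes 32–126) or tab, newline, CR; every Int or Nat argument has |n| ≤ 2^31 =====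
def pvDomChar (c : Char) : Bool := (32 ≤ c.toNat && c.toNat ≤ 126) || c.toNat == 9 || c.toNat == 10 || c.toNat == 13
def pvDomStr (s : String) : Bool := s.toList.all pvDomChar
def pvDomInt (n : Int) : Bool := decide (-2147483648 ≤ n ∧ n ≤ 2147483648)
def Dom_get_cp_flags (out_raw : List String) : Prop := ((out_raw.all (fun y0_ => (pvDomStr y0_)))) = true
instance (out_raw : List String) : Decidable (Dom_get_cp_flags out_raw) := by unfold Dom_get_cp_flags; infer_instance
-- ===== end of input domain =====

-- B is simpler: one first-match helper run once per header string (five independent scans) instead of A's single pass carrying five pieces of state.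

-- ===== PORT A =====
-- 'if flag is None: if sub in line: flag = i' for one flag
def pvUpd (acc : Option Int) (hit : Bool) (i : Int) : Option Int :=
  match acc with
  | none => if hit then some i else none
  | some v => some v

def get_cp_flags (out_raw : List String) : Option Int × Option Int × Option Int × Option Int × Option Int :=
  (PySem.List.pyRange 0 (PySem.List.len out_raw) 1).foldl
    (fun st i =>
      let line := PySem.List.pyGetD out_raw i ""
      (pvUpd st.1 (PySem.Str.isIn "* Critical point list, final report (non-equivalent cps)" line) i,
       pvUpd st.2.1 (PySem.Str.isIn "* Analysis of system bonds" line) i,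
       pvUpd st.2.2.1 (PySem.Str.isIn "# (x symbols are the non-equivalent representative atoms)" line) i,
       pvUpd st.2.2.2.1 (PySem.Str.isIn "* Complete CP list, bcp and rcp connectivity table" line) i,
       pvUpd st.2.2.2.2 (PySem.Str.isIn "* Attractor connectivity matrix" line) i))
    (none, none, none, none, none)

-- ===== PORT B =====
-- 'for i, line in enumerate(out_raw): if sub in line: return i; return None'
def firstLineWith (sub : String) (lines : List String) (k : Int) : Option Int :=
  match lines with
  | [] => none
  | l :: t => if PySem.Str.isIn sub l then some k else firstLineWith sub t (k + 1)

def get_cp_flags_alt (out_raw : List String) : Option Int × Option Int × Option Int × Option Int × Option Int :=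
  (firstLineWith "* Critical point list, final report (non-equivalent cps)" out_raw 0,
   firstLineWith "* Analysis of system bonds" out_raw 0,
   firstLineWith "# (x symbols are the non-equivalent representative atoms)" out_raw 0,
   firstLineWith "* Complete CP list, bcp and rcp connectivity table" out_raw 0,
   firstLineWith "* Attractor connectivity matrix" out_raw 0)

-- ===== PRECONDITION & SPEC =====
def Spec_get_cp_flags (out_raw : List String) (out : Option Int × Option Int × Option Int × Option Int × Option Int) : Prop := out = get_cp_flags_alt out_raw
instance (out_raw : List String) (out : Option Int × Option Int × Option Int × Option Int × Option Int) : Decidable (Spec_get_cp_flags out_raw out) := by unfold Spec_get_cp_flags; infer_instance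

-- ===== CLAIM (what is proved, stated in full; the proofs are below) =====
def Claim_equal_get_cp_flags : Prop := ∀ (out_raw : List String), Dom_get_cp_flags out_raw → Spec_get_cp_flags out_raw (get_cp_flags out_raw)

-- ===== LEMMAS AND PROOFS =====

-- one-pattern step of A's loop, over (index, line) pairs
def pvG (p : String) (acc : Option Int) (pr : Int × String) : Option Int :=
  pvUpd acc (PySem.Str.isIn p pr.2) pr.1

theorem pvG_foldl_some (p : String) (l : List (Int × String)) (v : Int) :
    l.foldl (pvG p) (some v) = some v := by
  induction l with
  | nil => rfl
  | cons x t ih => simpa [pvG, pvUpd] using ih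

theorem pvG_foldl_none (p : String) (lines : List String) (s : Int) :
    (PySem.List.enumerate lines s).foldl (pvG p) none = firstLineWith p lines s := by
  induction lines generalizing s with
  | nil => rfl
  | cons l t ih =>
    rw [PySem.List.enumerate_cons, List.foldl_cons]
    by_cases h : PySem.Str.isIn p l
    · have hc : PySem.Chars.isIn p.toList l.toList = true := by
        simpa [PySem.Str.isIn] using h
      rw [show pvG p none (s, l) = some s from by simp [pvG, pvUpd, PySem.Str.isIn, hc],
        pvG_foldl_some, firstLineWith, if_pos h]
    · have hc : PySem.Chars.isIn p.toList l.toList = false := by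
        simpa [PySem.Str.isIn] using h
      rw [show pvG p none (s, l) = none from by simp [pvG, pvUpd, PySem.Str.isIn, hc], ih,
        firstLineWith, if_neg h]

-- A's combined fold splits into five independent per-pattern folds
theorem pv_fold_split (l : List (Int × String))
    (st : Option Int × Option Int × Option Int × Option Int × Option Int) :
    l.foldl
      (fun st pr =>
        (pvG "* Critical point list, final report (non-equivalent cps)" st.1 pr,
         pvG "* Analysis of system bonds" st.2.1 pr,
         pvG "# (x symbols are the non-equivalent representative atoms)" st.2.2.1 pr,
         pvG "* Complete CP list, bcp and rcp connectivity table" st.2.2.2.1 pr,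
         pvG "* Attractor connectivity matrix" st.2.2.2.2 pr)) st
    = (l.foldl (pvG "* Critical point list, final report (non-equivalent cps)") st.1,
       l.foldl (pvG "* Analysis of system bonds") st.2.1,
       l.foldl (pvG "# (x symbols are the non-equivalent representative atoms)") st.2.2.1,
       l.foldl (pvG "* Complete CP list, bcp and rcp connectivity table") st.2.2.2.1,
       l.foldl (pvG "* Attractor connectivity matrix") st.2.2.2.2) := by
  induction l generalizing st with
  | nil => rfl
  | cons x t ih => simp [List.foldl_cons, ih]

-- ===== VERDICT (by name: the statement is the Claim_ definition above) =====
theorem get_cp_flags_spec : Claim_equal_get_cp_flags := by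
  intro out_raw _
  unfold Spec_get_cp_flags get_cp_flags get_cp_flags_alt
  have he : PySem.List.pyRange 0 (PySem.List.len out_raw) 1 =
      (PySem.List.enumerate out_raw 0).map (·.1) := by
    rw [PySem.List.map_fst_enumerate]; simp [PySem.List.len]
  rw [he, List.foldl_map]
  refine Eq.trans (PySem.List.foldl_congr_mem _ _
    (fun st pr =>
      (pvG "* Critical point list, final report (non-equivalent cps)" st.1 pr,
       pvG "* Analysis of system bonds" st.2.1 pr,
       pvG "# (x symbols are the non-equivalent representative atoms)" st.2.2.1 pr,
       pvG "* Complete CP list, bcp and rcp connectivity table" st.2.2.2.1 pr,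
       pvG "* Attractor connectivity matrix" st.2.2.2.2 pr)) _ ?_) ?_
  · intro acc pr hpr
    rcases (PySem.List.mem_enumerate_iff _ _ _).1 hpr with ⟨k, hk, rfl⟩
    simp [pvG, List.getElem?_eq_getElem hk]
  · rw [pv_fold_split]
    simp [pvG_foldl_none]
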